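-- pv_equiv track=rewrite | github.com/AP-MI-2021/lab-3-Luci01 | main.py | cifre_prime
-- ===== SOURCE A (Python) =====
-- def cifre_prime(nr):
--     '''
--     Functie care verifica daca numarul este format doar din cifre prime
--     :return: Bool, true daca numarul este format doar din cifre prime, false in caz contrar
--     '''
--     if nr == 0:
--         return False
--     while nr:
--         if nr % 10 == 1 or nr % 10 == 4 or nr % 10 == 6 or nr % 10 == 8 or nr % 10 == 9:
--             return False
--         nr = nr // 10
--     return True
-- ===== SOURCE B (Python) =====
-- PRIME_DIGITS = {'2', '3', '5', '7'}
--
--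
-- def cifre_prime(nr):
--     return all(c in PRIME_DIGITS for c in str(nr))
-- ===== Notes on version B (the rewrite author's own statement) =====
-- stated objective: idiomatic
-- what changed: B tests the characters of str(nr) against the set {'2','3','5','7'} in one all(), instead of A's arithmetic digit-extraction loop with %10 and //10 that rejects only the digits 1,4,6,8,9.
-- intended difference: On positive numbers whose digits all lie in {0,2,3,5,7} with at least one digit 0, A returns True because its loop never rejects the digit 0, while B returns False; 0 is not a prime digit, so B's value is the intended one. — e.g. on cifre_prime(20): A returns true, B returns false
import Mathlib
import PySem

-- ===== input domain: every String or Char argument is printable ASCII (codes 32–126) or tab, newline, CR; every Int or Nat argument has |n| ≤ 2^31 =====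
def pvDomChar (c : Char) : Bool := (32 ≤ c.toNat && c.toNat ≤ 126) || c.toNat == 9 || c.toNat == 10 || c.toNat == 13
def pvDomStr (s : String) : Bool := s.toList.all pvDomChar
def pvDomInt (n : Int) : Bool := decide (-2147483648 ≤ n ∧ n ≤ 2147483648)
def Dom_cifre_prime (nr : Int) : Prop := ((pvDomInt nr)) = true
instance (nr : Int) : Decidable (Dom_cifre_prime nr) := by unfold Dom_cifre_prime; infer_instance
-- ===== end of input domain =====

-- B checks the characters of str(nr) against the set {'2','3','5','7'} instead of A's %10 // 10
-- digit loop; A wrongly accepts the digit 0 (see D_ below), where B returns the intended False.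


-- ===== PORT A =====
-- termination measure fact for the 'while nr:' loop (cited by name in its decreasing_by)
theorem cifreLoop_dec (nr : Int)
    (hb : ¬(PySem.Int.mod nr 10 = 1 ∨ PySem.Int.mod nr 10 = 4 ∨ PySem.Int.mod nr 10 = 6 ∨
        PySem.Int.mod nr 10 = 8 ∨ PySem.Int.mod nr 10 = 9)) (h0 : ¬ nr = 0) :
    (PySem.Int.floordiv nr 10).natAbs < nr.natAbs := by
  have h1 := PySem.Int.floordiv_mul_add_mod nr 10
  have h2 := PySem.Int.mod_nonneg nr (b := 10) (by omega)
  have h3 := PySem.Int.mod_lt nr (b := 10) (by omega)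
  have h9 : PySem.Int.mod nr 10 ≠ 9 := by tauto
  omega

-- the 'while nr:' loop of A
def cifreLoop (nr : Int) : Bool :=
  if _h0 : nr = 0 then true
  else if _hb : PySem.Int.mod nr 10 = 1 ∨ PySem.Int.mod nr 10 = 4 ∨ PySem.Int.mod nr 10 = 6 ∨
        PySem.Int.mod nr 10 = 8 ∨ PySem.Int.mod nr 10 = 9 then false
  else cifreLoop (PySem.Int.floordiv nr 10)
termination_by nr.natAbs
decreasing_by exact cifreLoop_dec nr _hb _h0

def cifre_prime (nr : Int) : Bool :=
  if nr = 0 then false else cifreLoop nr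

-- ===== PORT B =====
def PRIME_DIGITS : PySem.Set Char := PySem.Set.ofList ['2', '3', '5', '7']

def cifre_prime_alt (nr : Int) : Bool :=
  (PySem.Int.toChars nr).all (fun c => PySem.Set.contains PRIME_DIGITS c)

-- ===== PRECONDITION & SPEC =====
-- On positive numbers whose digits all lie in {0,2,3,5,7} with at least one digit 0, A returns True because its loop
-- never rejects the digit 0, while B returns False; 0 is not a prime digit, so B's value is the intended one.
def D_cifre_prime (nr : Int) : Prop :=
  0 < nr ∧ (∀ d ∈ Nat.digits 10 nr.toNat, d = 0 ∨ d = 2 ∨ d = 3 ∨ d = 5 ∨ d = 7) ∧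
    0 ∈ Nat.digits 10 nr.toNat
instance (nr : Int) : Decidable (D_cifre_prime nr) := by unfold D_cifre_prime; infer_instance

def Spec_cifre_prime (nr : Int) (out : Bool) : Prop := ¬ D_cifre_prime nr → out = cifre_prime_alt nr
instance (nr : Int) (out : Bool) : Decidable (Spec_cifre_prime nr out) := by
  unfold Spec_cifre_prime; infer_instance

def pvDiffWitness_cifre_prime : Int := (20)
def pvDiffWitnessOut_cifre_prime : Bool × Bool := (true, false)

-- ===== CLAIM (what is proved, stated in full; the proofs are below) =====
def Claim_unchanged_cifre_prime : Prop :=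
  ∀ (nr : Int), Dom_cifre_prime nr → Spec_cifre_prime nr (cifre_prime nr)
def Claim_changed_cifre_prime : Prop :=
  Dom_cifre_prime (pvDiffWitness_cifre_prime) ∧ D_cifre_prime (pvDiffWitness_cifre_prime) ∧
  cifre_prime (pvDiffWitness_cifre_prime) = pvDiffWitnessOut_cifre_prime.1 ∧
  cifre_prime_alt (pvDiffWitness_cifre_prime) = pvDiffWitnessOut_cifre_prime.2 ∧
  pvDiffWitnessOut_cifre_prime.1 ≠ pvDiffWitnessOut_cifre_prime.2
def Claim_exact_cifre_prime : Prop :=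
  ∀ (nr : Int), Dom_cifre_prime nr → D_cifre_prime nr → cifre_prime nr ≠ cifre_prime_alt nr

-- ===== LEMMAS AND PROOFS =====

-- decimal digit characters of n, most significant first (proof-side model of Nat.toDigits 10)
def decChars (n : Nat) : List Char :=
  if _h : n < 10 then [Nat.digitChar n]
  else decChars (n / 10) ++ [Nat.digitChar (n % 10)]
termination_by n
decreasing_by exact Nat.div_lt_self (by omega) (by omega)

lemma toDigitsCore_eq_decChars :
    ∀ (f n : Nat) (acc : List Char), n < f →
      Nat.toDigitsCore 10 f n acc = decChars n ++ acc := by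
  intro f
  induction f with
  | zero => intro n acc h; omega
  | succ f ih =>
    intro n acc h
    rw [Nat.toDigitsCore]
    by_cases h10 : n / 10 = 0
    · have hn : n < 10 := by omega
      simp only [h10]
      rw [decChars, dif_pos hn, Nat.mod_eq_of_lt hn]
      simp
    · have hn : ¬ n < 10 := by omega
      simp only [h10]
      rw [ih (n / 10) _ (by omega)]
      conv_rhs => rw [decChars, dif_neg hn]
      simp

lemma toDigits_eq_decChars (n : Nat) : Nat.toDigits 10 n = decChars n := by
  rw [Nat.toDigits, toDigitsCore_eq_decChars (n + 1) n [] (by omega)]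
  simp

lemma decChars_eq_digits (n : Nat) (hn : 0 < n) :
    decChars n = ((Nat.digits 10 n).map Nat.digitChar).reverse := by
  induction n using Nat.strong_induction_on with
  | _ n ih =>
    rw [Nat.digits_def' (by norm_num) hn]
    by_cases h : n < 10
    · rw [decChars, dif_pos h]
      have : n / 10 = 0 := by omega
      rw [this]
      simp [Nat.mod_eq_of_lt h]
    · rw [decChars, dif_neg h]
      rw [ih (n / 10) (Nat.div_lt_self (by omega) (by omega)) (by omega)]
      simp

lemma all_congr_mem {a : Type} (l : List a) (p q : a → Bool)
    (h : ∀ x ∈ l, p x = q x) : l.all p = l.all q := by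
  induction l with
  | nil => rfl
  | cons x t ih =>
    simp only [List.all_cons, h x (by simp)]
    rw [ih (fun y hy => h y (by simp [hy]))]

lemma alt_pos_eq (m : Nat) (hm : 0 < m) :
    cifre_prime_alt (m : Int) =
      (Nat.digits 10 m).all
        (fun d => PySem.Set.contains PRIME_DIGITS (Nat.digitChar d)) := by
  have hneg : ¬ ((m : Int) < 0) := by omega
  rw [cifre_prime_alt, PySem.Int.toChars, if_neg hneg, Int.toNat_natCast,
    toDigits_eq_decChars, decChars_eq_digits m hm]
  simp [List.all_map, Function.comp_def]

lemma loop_pos_eq (nr : Int) (h : 0 < nr) :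
    cifreLoop nr =
      (Nat.digits 10 nr.toNat).all
        (fun d => !(d == 1 || d == 4 || d == 6 || d == 8 || d == 9)) := by
  induction nr using cifreLoop.induct with
  | case1 => omega
  | case2 nr h0 hb =>
    rw [cifreLoop, dif_neg h0, dif_pos hb]
    have hmod : PySem.Int.mod nr 10 = ((nr.toNat % 10 : Nat) : Int) := by
      have : nr = ((nr.toNat : Nat) : Int) := by omega
      rw [this]
      exact_mod_cast PySem.Int.mod_natCast nr.toNat 10
    rw [Nat.digits_def' (b := 10) (by norm_num) (by omega)]
    have : nr.toNat % 10 = 1 ∨ nr.toNat % 10 = 4 ∨ nr.toNat % 10 = 6 ∨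
        nr.toNat % 10 = 8 ∨ nr.toNat % 10 = 9 := by omega
    simp only [List.all_cons]
    rcases this with h' | h' | h' | h' | h' <;> rw [h'] <;> simp
  | case3 nr h0 hb ih =>
    rw [cifreLoop, dif_neg h0, dif_neg hb]
    have hmod : PySem.Int.mod nr 10 = ((nr.toNat % 10 : Nat) : Int) := by
      have : nr = ((nr.toNat : Nat) : Int) := by omega
      rw [this]
      exact_mod_cast PySem.Int.mod_natCast nr.toNat 10
    have hdiv : PySem.Int.floordiv nr 10 = ((nr.toNat / 10 : Nat) : Int) := by
      have : nr = ((nr.toNat : Nat) : Int) := by omega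
      rw [this]
      exact_mod_cast PySem.Int.floordiv_natCast nr.toNat 10
    rw [Nat.digits_def' (b := 10) (by norm_num) (by omega), List.all_cons]
    have hhead : (nr.toNat % 10 == 1 || nr.toNat % 10 == 4 || nr.toNat % 10 == 6 ||
        nr.toNat % 10 == 8 || nr.toNat % 10 == 9) = false := by
      simp only [Bool.or_eq_false_iff, beq_eq_false_iff_ne]
      omega
    rw [hhead]
    by_cases hq : nr.toNat / 10 = 0
    · rw [hdiv, hq]
      simp [cifreLoop]
    · rw [hdiv] at ih ⊢
      have := ih (by exact_mod_cast Nat.pos_of_ne_zero hq)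
      rw [this, Int.toNat_natCast]
      simp

lemma loop_neg (nr : Int) (h : nr < 0) : cifreLoop nr = false := by
  induction nr using cifreLoop.induct with
  | case1 => omega
  | case2 nr h0 hb => rw [cifreLoop, dif_neg h0, dif_pos hb]
  | case3 nr h0 hb ih =>
    rw [cifreLoop, dif_neg h0, dif_neg hb]
    apply ih
    have h1 := PySem.Int.floordiv_mul_add_mod nr 10
    have h2 := PySem.Int.mod_nonneg nr (b := 10) (by omega)
    have h3 := PySem.Int.mod_lt nr (b := 10) (by omega)
    omega

-- pointwise comparison of the two digit tests, away from the digit 0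
lemma digit_test_eq (d : Nat) (hlt : d < 10) (hne : d ≠ 0) :
    (!(d == 1 || d == 4 || d == 6 || d == 8 || d == 9)) =
      PySem.Set.contains PRIME_DIGITS (Nat.digitChar d) := by
  interval_cases d <;> first | (exact absurd rfl hne) | decide

lemma pos_eq_of_not_D (nr : Int) (hpos : 0 < nr) (hD : ¬ D_cifre_prime nr) :
    cifre_prime nr = cifre_prime_alt nr := by
  have hcast : ((nr.toNat : Nat) : Int) = nr := by omega
  rw [cifre_prime, if_neg (by omega), loop_pos_eq nr hpos, ← hcast,
    alt_pos_eq nr.toNat (by omega), Int.toNat_natCast]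
  by_cases hz : 0 ∈ Nat.digits 10 nr.toNat
  · have hbad : ∃ d ∈ Nat.digits 10 nr.toNat,
        ¬(d = 0 ∨ d = 2 ∨ d = 3 ∨ d = 5 ∨ d = 7) := by
      by_contra hc
      push Not at hc
      exact hD ⟨hpos, fun d hd => by have := hc d hd; tauto, hz⟩
    obtain ⟨d, hd, hdbad⟩ := hbad
    have hlt : d < 10 := Nat.digits_lt_base (by norm_num) hd
    have hA : (Nat.digits 10 nr.toNat).all
        (fun d => !(d == 1 || d == 4 || d == 6 || d == 8 || d == 9)) = false := by
      rw [List.all_eq_false]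
      refine ⟨d, hd, ?_⟩
      interval_cases d <;> first | (exact absurd (by tauto) hdbad) | decide
    have hB : (Nat.digits 10 nr.toNat).all
        (fun d => PySem.Set.contains PRIME_DIGITS (Nat.digitChar d)) = false := by
      rw [List.all_eq_false]
      refine ⟨d, hd, ?_⟩
      interval_cases d <;> first | (exact absurd (by tauto) hdbad) | decide
    rw [hA, hB]
  · exact all_congr_mem _ _ _ (fun d hd =>
      digit_test_eq d (Nat.digits_lt_base (by norm_num) hd)
        (fun h0 => hz (h0 ▸ hd)))

-- ===== VERDICT (by name: the statement is the Claim_ definition above) =====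
theorem cifre_prime_spec : Claim_unchanged_cifre_prime := by
  intro nr _ hD
  rcases lt_trichotomy nr 0 with hneg | hzero | hpos
  · rw [cifre_prime, if_neg (by omega), loop_neg nr hneg, cifre_prime_alt,
      PySem.Int.toChars, if_pos hneg]
    simp only [List.all_cons]
    rw [show PySem.Set.contains PRIME_DIGITS '-' = false from by decide]
    simp
  · subst hzero
    decide
  · exact pos_eq_of_not_D nr hpos hD

theorem cifre_prime_changed : Claim_changed_cifre_prime := by
  unfold Claim_changed_cifre_prime
  refine ⟨by decide, by decide, ?_, by decide, by decide⟩
  show cifre_prime 20 = true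
  rw [cifre_prime, if_neg (by omega), loop_pos_eq 20 (by norm_num)]
  decide

theorem cifre_prime_tight : Claim_exact_cifre_prime := by
  intro nr _ hD
  obtain ⟨hpos, hall, hz⟩ := hD
  have hcast : ((nr.toNat : Nat) : Int) = nr := by omega
  have hA : cifre_prime nr = true := by
    rw [cifre_prime, if_neg (by omega), loop_pos_eq nr hpos, List.all_eq_true]
    intro d hd
    have := hall d hd
    simp only [Bool.not_eq_eq_eq_not, Bool.not_true, Bool.or_eq_false_iff,
      beq_eq_false_iff_ne]
    omega
  have hB : cifre_prime_alt nr = false := by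
    rw [← hcast, alt_pos_eq nr.toNat (by omega)]
    rw [List.all_eq_false]
    exact ⟨0, hz, by decide⟩
  rw [hA, hB]
  simp
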